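-- pv_equiv track=rewrite | github.com/liuyujyyz/learning | python/word_gen.py | remove_bad_chars
-- ===== SOURCE A (Python) =====
-- def remove_bad_chars(raw):
--     re = []
--     word = ''
--     for i in raw:
--         if (i >= ord('a') and i <= ord('z')) or (i >= ord('A') and i <= ord('Z')):
--             word += chr(i)
--         else:
--             if word != '':
--                 word = word.lower()
--                 re.append(word)
--                 word = ''
--     return re
-- ===== SOURCE B (Python) =====
-- def _is_letter(c):
--     return ord('a') <= c <= ord('z') or ord('A') <= c <= ord('Z')
--
--
-- def remove_bad_chars(raw):
--     # Collect the maximal runs of letter codes as lowercased words.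
--     words = []
--     i, n = 0, len(raw)
--     while i < n:
--         if _is_letter(raw[i]):
--             j = i
--             while j < n and _is_letter(raw[j]):
--                 j += 1
--             words.append(''.join(chr(c) for c in raw[i:j]).lower())
--             i = j
--         else:
--             i += 1
--     return words
-- ===== Notes on version B (the rewrite author's own statement) =====
-- stated objective: alternative
-- what changed: B scans the input by maximal runs of letter codes (two-pointer run extraction, one word appended per run) instead of A's per-character loop with an accumulating word flushed on each delimiter.
-- intended difference: On inputs whose last element is a letter code, A silently drops the final word (it is only flushed when a later non-letter arrives) and returns the list without it, while B returns that trailing word too; a word-splitting function is evidently intended to return every word. — e.g. on remove_bad_chars([104, 105]): A returns [], B returns ["hi"]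
import Mathlib
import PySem

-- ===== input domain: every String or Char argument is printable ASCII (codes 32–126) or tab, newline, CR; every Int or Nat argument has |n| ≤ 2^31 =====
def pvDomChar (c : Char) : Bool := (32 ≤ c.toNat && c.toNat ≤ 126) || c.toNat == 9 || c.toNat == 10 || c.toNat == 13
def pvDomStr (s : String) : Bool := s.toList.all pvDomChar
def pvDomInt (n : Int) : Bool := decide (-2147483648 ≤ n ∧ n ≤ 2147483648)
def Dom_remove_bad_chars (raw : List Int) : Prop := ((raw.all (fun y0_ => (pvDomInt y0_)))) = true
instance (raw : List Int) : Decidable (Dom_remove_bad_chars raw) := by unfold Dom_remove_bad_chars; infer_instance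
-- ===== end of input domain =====

-- B collects the maximal runs of letter codes as lowercased words; A agrees except that it drops a trailing word (proved below as D_).

-- ===== PORT A =====
-- A's loop state: the result list `re` and the word accumulated so far (a Python str, kept as List Char).
def rbcLoopA : List Int → List String → List Char → List String
  | [], re, _ => re
  | i :: rest, re, word =>
    if ((97 ≤ i && i ≤ 122) || (65 ≤ i && i ≤ 90)) then
      rbcLoopA rest re (word ++ [Char.ofNat i.toNat])
    else
      if word ≠ [] then
        rbcLoopA rest (re ++ [String.ofList (PySem.Chars.lower word)]) []
      else
        rbcLoopA rest re word

def remove_bad_chars (raw : List Int) : List String := rbcLoopA raw [] []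

-- ===== PORT B =====
def isLetterB (c : Int) : Bool := ((97 ≤ c && c ≤ 122) || (65 ≤ c && c ≤ 90))

-- B's outer while-loop: at a letter, take the whole run as one lowered word and continue after it; else skip one element.
def rbcWords : List Int → List String
  | [] => []
  | c :: rest =>
    if h : isLetterB c then
      String.ofList (PySem.Chars.lower (((c :: rest).takeWhile isLetterB).map (fun x => Char.ofNat x.toNat)))
        :: rbcWords ((c :: rest).dropWhile isLetterB)
    else
      rbcWords rest
termination_by l => l.length
decreasing_by
  · simp only [List.dropWhile_cons, h, if_pos]
    exact Nat.lt_succ_of_le (List.length_dropWhile_le _ _)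
  · simp

def remove_bad_chars_alt (raw : List Int) : List String := rbcWords raw

-- ===== PRECONDITION & SPEC =====
-- On inputs whose last element is a letter code, A silently drops the final word (it is only flushed when a later
-- non-letter arrives), while B returns that trailing word too; returning every word is evidently the intent.
def D_remove_bad_chars (raw : List Int) : Prop :=
  raw ≠ [] ∧ ((97 ≤ raw.getLastD 0 ∧ raw.getLastD 0 ≤ 122) ∨ (65 ≤ raw.getLastD 0 ∧ raw.getLastD 0 ≤ 90))
instance (raw : List Int) : Decidable (D_remove_bad_chars raw) := by unfold D_remove_bad_chars; infer_instance

def Spec_remove_bad_chars (raw : List Int) (out : List String) : Prop := ¬ D_remove_bad_chars raw → out = remove_bad_chars_alt raw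
instance (raw : List Int) (out : List String) : Decidable (Spec_remove_bad_chars raw out) := by unfold Spec_remove_bad_chars; infer_instance

def pvDiffWitness_remove_bad_chars : List Int := [104, 105]
def pvDiffWitnessOut_remove_bad_chars : (List String) × (List String) := ([], ["hi"])

-- ===== CLAIM (what is proved, stated in full; the proofs are below) =====
def Claim_unchanged_remove_bad_chars : Prop := ∀ (raw : List Int), Dom_remove_bad_chars raw → Spec_remove_bad_chars raw (remove_bad_chars raw)
def Claim_changed_remove_bad_chars : Prop := Dom_remove_bad_chars (pvDiffWitness_remove_bad_chars) ∧ D_remove_bad_chars (pvDiffWitness_remove_bad_chars) ∧ remove_bad_chars (pvDiffWitness_remove_bad_chars) = pvDiffWitnessOut_remove_bad_chars.1 ∧ remove_bad_chars_alt (pvDiffWitness_remove_bad_chars) = pvDiffWitnessOut_remove_bad_chars.2 ∧ pvDiffWitnessOut_remove_bad_chars.1 ≠ pvDiffWitnessOut_remove_bad_chars.2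
def Claim_exact_remove_bad_chars : Prop := ∀ (raw : List Int), Dom_remove_bad_chars raw → D_remove_bad_chars raw → remove_bad_chars raw ≠ remove_bad_chars_alt raw

-- ===== LEMMAS AND PROOFS =====

-- Proof-side intermediate: a run-by-run loop with a pending completed word, bridging A's loop to rbcWords.
def rbcRuns : List Int → Option String → List String
  | [], _ => []
  | c :: rest, pending =>
    let a := isLetterB c
    let run := (c :: rest).takeWhile (fun x => isLetterB x == a)
    let rest' := (c :: rest).dropWhile (fun x => isLetterB x == a)
    if a then
      rbcRuns rest' (some (String.ofList (PySem.Chars.lower (run.map (fun x => Char.ofNat x.toNat)))))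
    else
      match pending with
      | some w => w :: rbcRuns rest' none
      | none => rbcRuns rest' none
termination_by l _ => l.length
decreasing_by
  all_goals
    simp only [List.dropWhile_cons, beq_self_eq_true, if_pos]
    exact Nat.lt_succ_of_le (List.length_dropWhile_le _ _)

-- Feeding an all-letter run into A's loop just extends the word.
theorem rbcLoopA_alpha_run (run : List Int) (rest : List Int) (re : List String)
    (word : List Char) (h : ∀ c ∈ run, isLetterB c = true) :
    rbcLoopA (run ++ rest) re word
      = rbcLoopA rest re (word ++ run.map (fun x => Char.ofNat x.toNat)) := by
  induction run generalizing word with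
  | nil => simp
  | cons c cs ih =>
    have hc : isLetterB c = true := h c (by simp)
    simp only [List.cons_append, rbcLoopA, isLetterB] at hc ⊢
    rw [if_pos hc, ih _ (fun x hx => h x (by simp [hx]))]
    simp

-- Feeding an all-non-letter run into A's loop with an empty word is a no-op.
theorem rbcLoopA_nonalpha_run (run : List Int) (rest : List Int) (re : List String)
    (h : ∀ c ∈ run, isLetterB c = false) :
    rbcLoopA (run ++ rest) re [] = rbcLoopA rest re [] := by
  induction run with
  | nil => simp
  | cons c cs ih =>
    have hc : isLetterB c = false := h c (by simp)
    simp only [List.cons_append, rbcLoopA, isLetterB] at hc ⊢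
    rw [if_neg (by simp [hc])]
    simp only [ne_eq, not_true_eq_false]
    exact ih (fun x hx => h x (by simp [hx]))

-- The head of a dropWhile result fails the predicate.
theorem head_dropWhile_false {α : Type} (p : α → Bool) (l : List α) (x : α) (xs : List α)
    (h : l.dropWhile p = x :: xs) : p x = false := by
  induction l with
  | nil => simp at h
  | cons c cs ih =>
    by_cases hc : p c = true
    · exact ih (by simpa [List.dropWhile_cons, hc] using h)
    · rw [List.dropWhile_cons, if_neg hc] at h
      obtain ⟨rfl, -⟩ := List.cons_eq_cons.mp h
      simpa using hc

-- Main invariant, by strong induction on the length: A's loop from state (re, word)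
-- equals re ++ the run loop with the matching pending word (word = [] or a completed run).
theorem rbcMain : ∀ n l, l.length ≤ n →
    (∀ re : List String, rbcLoopA l re [] = re ++ rbcRuns l none) ∧
    (∀ (re : List String) (word : List Char), word ≠ [] →
      (∀ c xs, l = c :: xs → isLetterB c = false) →
      rbcLoopA l re word = re ++ rbcRuns l (some (String.ofList (PySem.Chars.lower word)))) := by
  intro n
  induction n with
  | zero =>
    intro l hl
    have hnil : l = [] := List.length_eq_zero_iff.mp (Nat.le_zero.mp hl)
    subst hnil
    exact ⟨fun re => by simp [rbcLoopA, rbcRuns], fun re word _ _ => by simp [rbcLoopA, rbcRuns]⟩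
  | succ n ih =>
    intro l hl
    match l with
    | [] => exact ⟨fun re => by simp [rbcLoopA, rbcRuns], fun re word _ _ => by simp [rbcLoopA, rbcRuns]⟩
    | c :: rest =>
      have hdrop : (c :: rest).dropWhile (fun x => isLetterB x == isLetterB c)
          = rest.dropWhile (fun x => isLetterB x == isLetterB c) := by
        simp
      have htake : (c :: rest).takeWhile (fun x => isLetterB x == isLetterB c)
          = c :: rest.takeWhile (fun x => isLetterB x == isLetterB c) := by
        simp
      have hlen : ((c :: rest).dropWhile (fun x => isLetterB x == isLetterB c)).length ≤ n := by
        have h1 := List.length_dropWhile_le (fun x => isLetterB x == isLetterB c) rest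
        have h2 : rest.length + 1 ≤ n + 1 := by simpa using hl
        rw [hdrop]; omega
      have hsplit := List.takeWhile_append_dropWhile
        (p := fun x => isLetterB x == isLetterB c) (l := c :: rest)
      have hhead : ∀ x xs, (c :: rest).dropWhile (fun x => isLetterB x == isLetterB c) = x :: xs →
          (isLetterB x == isLetterB c) = false :=
        fun x xs hx => head_dropWhile_false (fun y => isLetterB y == isLetterB c) _ _ _ hx
      constructor
      · intro re
        by_cases ha : isLetterB c = true
        · -- the input starts with a maximal letter run
          have hall : ∀ x ∈ (c :: rest).takeWhile (fun x => isLetterB x == isLetterB c),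
              isLetterB x = true := by
            intro x hx
            have h' := List.mem_takeWhile_imp hx
            rw [ha] at h'; simpa using h'
          conv_lhs => rw [← hsplit]
          rw [rbcLoopA_alpha_run _ _ _ _ hall, List.nil_append]
          have hne : ((c :: rest).takeWhile (fun x => isLetterB x == isLetterB c)).map
              (fun x => Char.ofNat x.toNat) ≠ [] := by
            rw [htake]; simp
          have hcond : ∀ c' xs,
              (c :: rest).dropWhile (fun x => isLetterB x == isLetterB c) = c' :: xs →
              isLetterB c' = false := by
            intro c' xs hx
            have h' := hhead c' xs hx
            rw [ha] at h'
            cases h2 : isLetterB c' with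
            | false => rfl
            | true => rw [h2] at h'; simp at h'
          rw [(ih _ hlen).2 re _ hne hcond]
          conv_rhs => rw [rbcRuns]
          simp only [ha, if_pos]
        · -- the input starts with a maximal non-letter run
          have haf : isLetterB c = false := by cases h2 : isLetterB c with
            | false => rfl
            | true => exact absurd h2 ha
          have hall : ∀ x ∈ (c :: rest).takeWhile (fun x => isLetterB x == isLetterB c),
              isLetterB x = false := by
            intro x hx
            have h' := List.mem_takeWhile_imp hx
            rw [haf] at h'; simpa using h'
          conv_lhs => rw [← hsplit]
          rw [rbcLoopA_nonalpha_run _ _ _ hall]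
          rw [(ih _ hlen).1 re]
          conv_rhs => rw [rbcRuns]
          simp [haf]
      · intro re word hword hcnd
        have haf : isLetterB c = false := hcnd c rest rfl
        have hallrest : ∀ x ∈ rest.takeWhile (fun x => isLetterB x == isLetterB c),
            isLetterB x = false := by
          intro x hx
          have h' := List.mem_takeWhile_imp hx
          rw [haf] at h'; simpa using h'
        have hsplitr := List.takeWhile_append_dropWhile
          (p := fun x => isLetterB x == isLetterB c) (l := rest)
        rw [show rbcLoopA (c :: rest) re word
              = rbcLoopA rest (re ++ [String.ofList (PySem.Chars.lower word)]) [] by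
            simp only [rbcLoopA, isLetterB] at haf ⊢
            rw [if_neg (by simp [haf]), if_pos hword]]
        conv_lhs => rw [← hsplitr]
        rw [rbcLoopA_nonalpha_run _ _ _ hallrest]
        rw [← hdrop, (ih _ hlen).1]
        conv_rhs => rw [rbcRuns]
        simp [haf]

-- Proof-side view of D_: the input ends with a letter code.
def endsLetter (l : List Int) : Bool :=
  match l.getLast? with
  | some c => isLetterB c
  | none => false

theorem D_iff_endsLetter (raw : List Int) :
    D_remove_bad_chars raw ↔ endsLetter raw = true := by
  unfold D_remove_bad_chars endsLetter
  cases h : raw.getLast? with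
  | none =>
    have : raw = [] := List.getLast?_eq_none_iff.mp h
    simp [this]
  | some c =>
    have hne : raw ≠ [] := by rintro rfl; simp at h
    simp [hne, h, List.getLastD_eq_getLast?, isLetterB]

-- What A computes relative to B: B's words minus a trailing one when the input ends with a letter.
def truncW (l : List Int) (xs : List String) : List String :=
  if endsLetter l then xs.dropLast else xs

theorem endsLetter_eq_isLetterB_getLast? (l : List Int) :
    endsLetter l = (match l.getLast? with | some c => isLetterB c | none => false) := rfl

theorem endsLetter_append (pre t : List Int) (ht : t ≠ []) :
    endsLetter (pre ++ t) = endsLetter t := by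
  rw [endsLetter_eq_isLetterB_getLast?, endsLetter_eq_isLetterB_getLast?,
    List.getLast?_append_of_ne_nil _ ht]

theorem endsLetter_all_false (l : List Int) (h : ∀ c ∈ l, isLetterB c = false) :
    endsLetter l = false := by
  rw [endsLetter_eq_isLetterB_getLast?]
  cases hg : l.getLast? with
  | none => rfl
  | some c => exact h c (List.mem_of_getLast? hg)

theorem endsLetter_all_true (l : List Int) (hne : l ≠ []) (h : ∀ c ∈ l, isLetterB c = true) :
    endsLetter l = true := by
  rw [endsLetter_eq_isLetterB_getLast?]
  cases hg : l.getLast? with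
  | none => exact absurd (List.getLast?_eq_none_iff.mp hg) hne
  | some c => exact h c (List.mem_of_getLast? hg)

theorem endsLetter_cons (c : Int) (rest : List Int) (h : rest ≠ []) :
    endsLetter (c :: rest) = endsLetter rest := by
  simpa using endsLetter_append [c] rest h

theorem rbcWords_nonalpha_prefix (pre t : List Int) (h : ∀ c ∈ pre, isLetterB c = false) :
    rbcWords (pre ++ t) = rbcWords t := by
  induction pre with
  | nil => simp
  | cons c cs ih =>
    have hc : isLetterB c = false := h c (by simp)
    rw [List.cons_append, rbcWords, dif_neg (by simp [hc])]
    exact ih (fun x hx => h x (by simp [hx]))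

theorem rbcWords_ne_nil (l : List Int) (h : endsLetter l = true) : rbcWords l ≠ [] := by
  induction l with
  | nil => simp [endsLetter] at h
  | cons c rest ih =>
    by_cases hc : isLetterB c = true
    · rw [rbcWords, dif_pos hc]; simp
    · have hcf : isLetterB c = false := by cases h2 : isLetterB c with
        | false => rfl
        | true => exact absurd h2 hc
      have hrest : rest ≠ [] := by
        rintro rfl
        rw [endsLetter_eq_isLetterB_getLast?] at h
        simp [hcf] at h
      rw [endsLetter_cons c rest hrest] at h
      rw [rbcWords, dif_neg (by simp [hcf])]
      exact ih h

theorem truncW_congr (pre t : List Int) (ht : ∀ c ∈ pre, isLetterB c = false) (xs : List String) :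
    truncW (pre ++ t) xs = truncW t xs := by
  unfold truncW
  by_cases h : t = []
  · subst h
    rw [List.append_nil, endsLetter_all_false pre ht]
    simp [endsLetter]
  · rw [endsLetter_append pre t h]

theorem takeWhile_takeWhile_self {α : Type} (p : α → Bool) (l : List α) :
    (l.takeWhile p).takeWhile p = l.takeWhile p := by
  induction l with
  | nil => simp
  | cons c cs ih =>
    by_cases hc : p c = true
    · simp [hc, ih]
    · simp [hc]

-- Bridge: the pending-run loop equals rbcWords truncated by a trailing letter run.
theorem rbcBridge : ∀ n l, l.length ≤ n →
    rbcRuns l none = truncW l (rbcWords l) ∧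
    (∀ w : String, (∀ c xs, l = c :: xs → isLetterB c = false) →
      rbcRuns l (some w) = if l = [] then [] else w :: truncW l (rbcWords l)) := by
  intro n
  induction n with
  | zero =>
    intro l hl
    have hnil : l = [] := List.length_eq_zero_iff.mp (Nat.le_zero.mp hl)
    subst hnil
    exact ⟨by simp [rbcRuns, rbcWords, truncW, endsLetter], fun w _ => by simp [rbcRuns]⟩
  | succ n ih =>
    intro l hl
    match l with
    | [] => exact ⟨by simp [rbcRuns, rbcWords, truncW, endsLetter], fun w _ => by simp [rbcRuns]⟩
    | c :: rest =>
      have hlen : ∀ p : Int → Bool, ((c :: rest).dropWhile p).length ≤ n → True := fun _ _ => trivial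
      by_cases ha : isLetterB c = true
      · -- leading maximal letter run
        have hp : (fun x => isLetterB x == true) = (fun x => isLetterB x) := by
          funext x; cases isLetterB x <;> rfl
        have hlen' : ((c :: rest).dropWhile (fun x => isLetterB x)).length ≤ n := by
          have := List.length_dropWhile_le (fun x => isLetterB x) rest
          have h2 : rest.length + 1 ≤ n + 1 := by simpa using hl
          simp only [List.dropWhile_cons, ha, if_pos]
          omega
        have hall : ∀ x ∈ (c :: rest).takeWhile (fun x => isLetterB x), isLetterB x = true :=
          fun x hx => List.mem_takeWhile_imp hx
        have hsplit := List.takeWhile_append_dropWhile (p := fun x => isLetterB x) (l := c :: rest)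
        have hwords : rbcWords (c :: rest)
            = String.ofList (PySem.Chars.lower (((c :: rest).takeWhile (fun x => isLetterB x)).map
                (fun x => Char.ofNat x.toNat))) :: rbcWords ((c :: rest).dropWhile (fun x => isLetterB x)) := by
          rw [rbcWords, dif_pos ha]
        have hcond : ∀ c' xs, (c :: rest).dropWhile (fun x => isLetterB x) = c' :: xs →
            isLetterB c' = false := by
          intro c' xs hx
          have := head_dropWhile_false (fun x => isLetterB x) _ _ _ hx
          simpa using this
        have htake_ne : (c :: rest).takeWhile (fun x => isLetterB x) ≠ [] := by
          simp [ha]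
        constructor
        · rw [rbcRuns]
          simp only [ha, if_pos]
          rw [hp, (ih _ hlen').2 _ hcond, hwords]
          by_cases hre : (c :: rest).dropWhile (fun x => isLetterB x) = []
          · -- the whole input is one letter run: A drops it
            have halll : ∀ x ∈ c :: rest, isLetterB x = true := by
              have : (c :: rest).takeWhile (fun x => isLetterB x) = c :: rest := by
                rw [← hsplit, hre, List.append_nil]
                exact takeWhile_takeWhile_self _ _
              intro x hx; rw [← this] at hx; exact hall x hx
            have hel : endsLetter (c :: rest) = true :=
              endsLetter_all_true _ (by simp) halll
            have h0 : rbcWords ([] : List Int) = [] := by rw [rbcWords]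
            rw [hre, h0]
            simp [truncW, hel]
          · rw [if_neg hre]
            have heq : truncW (c :: rest) (String.ofList (PySem.Chars.lower (((c :: rest).takeWhile (fun x => isLetterB x)).map (fun x => Char.ofNat x.toNat))) :: rbcWords ((c :: rest).dropWhile (fun x => isLetterB x)))
                = String.ofList (PySem.Chars.lower (((c :: rest).takeWhile (fun x => isLetterB x)).map (fun x => Char.ofNat x.toNat))) :: truncW ((c :: rest).dropWhile (fun x => isLetterB x)) (rbcWords ((c :: rest).dropWhile (fun x => isLetterB x))) := by
              unfold truncW
              have hends : endsLetter (c :: rest) = endsLetter ((c :: rest).dropWhile (fun x => isLetterB x)) := by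
                conv_lhs => rw [← hsplit]
                exact endsLetter_append _ _ hre
              rw [hends]
              by_cases he : endsLetter ((c :: rest).dropWhile (fun x => isLetterB x)) = true
              · rw [he]
                simp only [if_pos]
                rw [List.dropLast_cons_of_ne_nil (rbcWords_ne_nil _ he)]
              · have he' : endsLetter ((c :: rest).dropWhile (fun x => isLetterB x)) = false := by
                  cases h2 : endsLetter ((c :: rest).dropWhile (fun x => isLetterB x)) with
                  | false => rfl
                  | true => exact absurd h2 he
                rw [he']; simp
            rw [heq]
        · intro w hw
          exact absurd ha (by simp [hw c rest rfl])
      · -- leading maximal non-letter run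
        have haf : isLetterB c = false := by cases h2 : isLetterB c with
          | false => rfl
          | true => exact absurd h2 ha
        have hp : (fun x => isLetterB x == false) = (fun x => !isLetterB x) := by
          funext x; cases isLetterB x <;> rfl
        have hlen' : ((c :: rest).dropWhile (fun x => !isLetterB x)).length ≤ n := by
          have := List.length_dropWhile_le (fun x => !isLetterB x) rest
          have h2 : rest.length + 1 ≤ n + 1 := by simpa using hl
          simp only [List.dropWhile_cons, haf, Bool.not_false, if_pos]
          omega
        have hall : ∀ x ∈ (c :: rest).takeWhile (fun x => !isLetterB x), isLetterB x = false := by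
          intro x hx
          have := List.mem_takeWhile_imp hx
          simpa using this
        have hsplit := List.takeWhile_append_dropWhile (p := fun x => !isLetterB x) (l := c :: rest)
        have hWeq : rbcWords (c :: rest) = rbcWords ((c :: rest).dropWhile (fun x => !isLetterB x)) := by
          conv_lhs => rw [← hsplit]
          exact rbcWords_nonalpha_prefix _ _ hall
        have hTeq : ∀ xs, truncW (c :: rest) xs = truncW ((c :: rest).dropWhile (fun x => !isLetterB x)) xs := by
          intro xs
          conv_lhs => rw [← hsplit]
          exact truncW_congr _ _ hall xs
        constructor
        · rw [rbcRuns]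
          simp only [haf, Bool.false_eq_true]
          rw [hp, (ih _ hlen').1, hWeq, hTeq]
          simp
        · intro w hw
          rw [rbcRuns]
          simp only [haf, Bool.false_eq_true]
          rw [hp]
          rw [(ih _ hlen').1, hWeq, hTeq]
          simp

-- ===== VERDICT (by name: the statements are the Claim_ definitions above) =====
theorem remove_bad_chars_spec : Claim_unchanged_remove_bad_chars := by
  intro raw _ hnd
  unfold remove_bad_chars remove_bad_chars_alt
  have h1 : rbcLoopA raw [] [] = rbcRuns raw none := by
    simpa using (rbcMain raw.length raw le_rfl).1 []
  have h2 := (rbcBridge raw.length raw le_rfl).1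
  have hd : endsLetter raw = false := by
    cases h : endsLetter raw with
    | false => rfl
    | true => exact absurd ((D_iff_endsLetter raw).mpr h) hnd
  rw [h1, h2, truncW, hd]
  simp

theorem remove_bad_chars_changed : Claim_changed_remove_bad_chars := by
  unfold Claim_changed_remove_bad_chars
  refine ⟨by decide, by decide, by decide, ?_, by decide⟩
  show remove_bad_chars_alt [104, 105] = ["hi"]
  rw [remove_bad_chars_alt, rbcWords, dif_pos (by decide),
    show ([(104 : Int), 105].dropWhile isLetterB) = [] by decide, rbcWords]
  decide

theorem remove_bad_chars_tight : Claim_exact_remove_bad_chars := by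
  intro raw _ hd
  unfold remove_bad_chars remove_bad_chars_alt
  have h1 : rbcLoopA raw [] [] = rbcRuns raw none := by
    simpa using (rbcMain raw.length raw le_rfl).1 []
  have h2 := (rbcBridge raw.length raw le_rfl).1
  have hd' : endsLetter raw = true := (D_iff_endsLetter raw).mp hd
  have hne := rbcWords_ne_nil raw hd'
  rw [h1, h2, truncW, hd']
  simp only [if_pos]
  intro hcontra
  have := congrArg List.length hcontra
  rw [List.length_dropLast] at this
  have : (rbcWords raw).length ≠ 0 := by
    simpa [List.length_eq_zero_iff] using hne
  omega
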